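-- pv_equiv track=rewrite | github.com/JanSochman/AoC | 2023/day15.py | part1
-- ===== SOURCE A (Python) =====
-- def part1(data):
--     data = data[0].replace('\n', '').replace('\r', '')
--     parts = data.split(',')
--     sum = 0
--     for p in parts:
--         val = 0
--         for c in p:
--             val = ((val + ord(c)) * 17) % 256
--         sum += val
--
--     return sum
-- ===== SOURCE B (Python) =====
-- def part1(data):
--     total = 0
--     val = 0
--     for c in data[0]:
--         if c == '\n' or c == '\r':
--             continue
--         if c == ',':
--             total += val
--             val = 0
--         else:
--             val = ((val + ord(c)) * 17) % 256
--     return total + val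
-- ===== Notes on version B (the rewrite author's own statement) =====
-- stated objective: simpler
-- what changed: Replaces A's replace-then-split-then-nested-loops with one flat scan over the raw string, keeping a running hash that is flushed into the total at each comma (newline/CR skipped inline).
import Mathlib
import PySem

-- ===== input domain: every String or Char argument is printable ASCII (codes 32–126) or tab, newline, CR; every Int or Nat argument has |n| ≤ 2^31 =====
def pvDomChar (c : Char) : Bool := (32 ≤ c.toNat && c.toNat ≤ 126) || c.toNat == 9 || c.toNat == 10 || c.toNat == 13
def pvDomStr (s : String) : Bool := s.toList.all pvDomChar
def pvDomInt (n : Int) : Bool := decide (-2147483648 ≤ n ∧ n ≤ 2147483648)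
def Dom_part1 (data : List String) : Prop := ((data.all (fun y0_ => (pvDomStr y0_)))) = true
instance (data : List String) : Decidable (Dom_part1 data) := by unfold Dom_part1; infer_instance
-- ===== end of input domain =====

-- B is a single flat scan over the raw string (running hash flushed at each comma,
-- newline/CR skipped inline) instead of A's replace-then-split-then-nested-loops.

-- ===== PORT A =====
def part1 (data : List String) : Int :=
  match PySem.List.pyGet? data 0 with
  | none => 0  -- data[0] raises IndexError; excluded by Pre_part1
  | some s0 =>
    let d := PySem.Chars.replace (PySem.Chars.replace s0.toList ['\n'] []) ['\r'] []
    let parts := PySem.Chars.splitOn d [',']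
    parts.foldl
      (fun sum p =>
        sum + p.foldl (fun val c => PySem.Int.mod ((val + (c.toNat : Int)) * 17) 256) 0) 0

-- ===== PORT B =====
def part1_alt (data : List String) : Int :=
  match PySem.List.pyGet? data 0 with
  | none => 0  -- data[0] raises IndexError; excluded by Pre_part1
  | some s0 =>
    let st := s0.toList.foldl
      (fun (st : Int × Int) c =>
        if c = '\n' ∨ c = '\r' then st
        else if c = ',' then (st.1 + st.2, 0)
        else (st.1, PySem.Int.mod ((st.2 + (c.toNat : Int)) * 17) 256)) (0, 0)
    st.1 + st.2

-- ===== PRECONDITION & SPEC =====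
-- Pre_ excludes only the empty input list, on which A raises IndexError at data[0].
def Pre_part1 (data : List String) : Prop := data ≠ []
instance (data : List String) : Decidable (Pre_part1 data) := by unfold Pre_part1; infer_instance
def pvWitness_part1 : List String := ["rn=1,cm-"]
def Spec_part1 (data : List String) (out : Int) : Prop := out = part1_alt data
instance (data : List String) (out : Int) : Decidable (Spec_part1 data out) := by unfold Spec_part1; infer_instance

-- ===== CLAIM (what is proved, stated in full; the proofs are below) =====
def Claim_equal_part1 : Prop := ∀ (data : List String), Dom_part1 data → Pre_part1 data → Spec_part1 data (part1 data)

-- ===== LEMMAS AND PROOFS =====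

-- hash step
def pvStep (val : Int) (c : Char) : Int := PySem.Int.mod ((val + (c.toNat : Int)) * 17) 256

-- spec-level comma splitter
def pvSplitC : List Char → List (List Char)
  | [] => [[]]
  | c :: t => if c = ',' then [] :: pvSplitC t else (pvSplitC t).modifyHead (c :: ·)

-- B's summed-parts value, continuing from a running hash v
def pvSum (v : Int) : List Char → Int
  | [] => v
  | c :: t => if c = ',' then v + pvSum 0 t else pvSum (pvStep v c) t

lemma pvSplitC_ne_nil (cs : List Char) : pvSplitC cs ≠ [] := by
  cases cs with
  | nil => simp [pvSplitC]
  | cons c t =>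
    simp only [pvSplitC]
    split_ifs
    · simp
    · cases h : pvSplitC t with
      | nil => exact absurd h (pvSplitC_ne_nil t)
      | cons p ps => simp

-- replace by "" on a single character is filter
lemma replace_go_single (c : Char) :
    ∀ (l : List Char) (fuel : Nat) (acc : List Char), l.length ≤ fuel →
      PySem.Chars.replace.go [c] [] fuel l acc = acc.reverse ++ l.filter (· ≠ c) := by
  intro l
  induction l with
  | nil => intro fuel acc _; cases fuel <;> simp [PySem.Chars.replace.go]
  | cons d t ih =>
    intro fuel acc h
    cases fuel with
    | zero => simp at h
    | succ f =>
      simp only [PySem.Chars.replace.go]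
      by_cases hd : d = c
      · subst hd
        have : List.isPrefixOf [d] (d :: t) = true := by simp [List.isPrefixOf]
        rw [if_pos this]
        simp only [List.length_cons] at h
        simpa [List.filter] using ih f acc (by omega)
      · have : List.isPrefixOf [c] (d :: t) = false := by
          simp [List.isPrefixOf, Ne.symm hd]
        rw [if_neg (by simp [this])]
        simp only [List.length_cons] at h
        rw [ih f (d :: acc) (by omega)]
        simp [List.filter, hd]

lemma replace_single (c : Char) (cs : List Char) :
    PySem.Chars.replace cs [c] [] = cs.filter (· ≠ c) := by
  simpa [PySem.Chars.replace] using replace_go_single c cs cs.length [] le_rfl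

-- splitOn on a single comma is pvSplitC
lemma splitOn_go_comma :
    ∀ (l : List Char) (fuel : Nat) (cur : List Char) (acc : List (List Char)),
      l.length ≤ fuel →
      PySem.Chars.splitOn.go [','] fuel l cur acc =
        acc.reverse ++ (pvSplitC l).modifyHead (cur.reverse ++ ·) := by
  intro l
  induction l with
  | nil =>
    intro fuel cur acc _
    cases fuel <;> simp [PySem.Chars.splitOn.go, pvSplitC]
  | cons d t ih =>
    intro fuel cur acc h
    cases fuel with
    | zero => simp at h
    | succ f =>
      simp only [PySem.Chars.splitOn.go]
      simp only [List.length_cons] at h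
      by_cases hd : d = ','
      · subst hd
        have : List.isPrefixOf [','] (',' :: t) = true := by simp [List.isPrefixOf]
        rw [if_pos this]
        rw [show List.drop [','].length (',' :: t) = t from rfl]
        rw [ih f [] (cur.reverse :: acc) (by omega)]
        simp only [pvSplitC]
        cases pvSplitC t <;> simp
      · have : List.isPrefixOf [','] (d :: t) = false := by
          simp [List.isPrefixOf, Ne.symm hd]
        rw [if_neg (by simp [this])]
        rw [ih f (d :: cur) acc (by omega)]
        obtain ⟨p, ps, hp⟩ : ∃ p ps, pvSplitC t = p :: ps := by
          cases hq : pvSplitC t with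
          | nil => exact absurd hq (pvSplitC_ne_nil t)
          | cons p ps => exact ⟨p, ps, rfl⟩
        simp [pvSplitC, hd, hp]

lemma splitOn_comma (cs : List Char) :
    PySem.Chars.splitOn cs [','] = pvSplitC cs := by
  rw [PySem.Chars.splitOn, splitOn_go_comma cs (cs.length + 1) [] [] (by omega)]
  cases pvSplitC cs <;> simp

-- folding + over hashes of parts
lemma foldl_add_hash (l : List (List Char)) (a : Int) :
    l.foldl (fun s p => s + p.foldl pvStep 0) a = a + (l.map (·.foldl pvStep 0)).sum := by
  induction l generalizing a with
  | nil => simp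
  | cons p ps ih => simp [ih]; ring

-- the split-and-hash sum equals pvSum
lemma pvSum_splitC (cs : List Char) : ∀ v : Int,
    pvSum v cs =
      match pvSplitC cs with
      | [] => 0
      | p :: ps => p.foldl pvStep v + (ps.map (·.foldl pvStep 0)).sum := by
  induction cs with
  | nil => intro v; simp [pvSum, pvSplitC]
  | cons c t ih =>
    intro v
    by_cases hc : c = ','
    · subst hc
      simp only [pvSum, pvSplitC, if_pos]
      rw [ih 0]
      obtain ⟨p, ps, hp⟩ : ∃ p ps, pvSplitC t = p :: ps := by
        cases hq : pvSplitC t with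
        | nil => exact absurd hq (pvSplitC_ne_nil t)
        | cons p ps => exact ⟨p, ps, rfl⟩
      rw [hp]
      simp
      try ring
    · simp only [pvSum, pvSplitC, if_neg hc]
      rw [ih (pvStep v c)]
      obtain ⟨p, ps, hp⟩ : ∃ p ps, pvSplitC t = p :: ps := by
        cases hq : pvSplitC t with
        | nil => exact absurd hq (pvSplitC_ne_nil t)
        | cons p ps => exact ⟨p, ps, rfl⟩
      rw [hp]
      simp [List.foldl]

-- B's scan state characterisation
lemma scan_eq (cs : List Char) : ∀ t v : Int,
    (cs.foldl
      (fun (st : Int × Int) c =>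
        if c = '\n' ∨ c = '\r' then st
        else if c = ',' then (st.1 + st.2, 0)
        else (st.1, pvStep st.2 c)) (t, v)).1 +
    (cs.foldl
      (fun (st : Int × Int) c =>
        if c = '\n' ∨ c = '\r' then st
        else if c = ',' then (st.1 + st.2, 0)
        else (st.1, pvStep st.2 c)) (t, v)).2 =
    t + pvSum v ((cs.filter (· ≠ '\n')).filter (· ≠ '\r')) := by
  induction cs with
  | nil => intro t v; simp [pvSum]
  | cons c cs ih =>
    intro t v
    by_cases hn : c = '\n' ∨ c = '\r'
    · have hf : (((c :: cs).filter (· ≠ '\n')).filter (· ≠ '\r')) =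
          ((cs.filter (· ≠ '\n')).filter (· ≠ '\r')) := by
        rcases hn with h | h <;> subst h <;> simp
      rw [List.foldl_cons,
        show (if c = '\n' ∨ c = '\r' then (t, v)
          else if c = ',' then (t + v, 0) else (t, pvStep v c)) = (t, v) from if_pos hn,
        hf]
      exact ih t v
    · rw [not_or] at hn
      have hf : (((c :: cs).filter (· ≠ '\n')).filter (· ≠ '\r')) =
          c :: ((cs.filter (· ≠ '\n')).filter (· ≠ '\r')) := by
        simp [List.filter, hn.1, hn.2]
      by_cases hc : c = ','
      · subst hc
        rw [List.foldl_cons,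
          show (if (',' : Char) = '\n' ∨ (',' : Char) = '\r' then (t, v)
            else if (',' : Char) = ',' then (t + v, 0) else (t, pvStep v ',')) = (t + v, 0) from by
              rw [if_neg (by decide), if_pos rfl],
          hf, ih (t + v) 0]
        simp [pvSum]; ring
      · rw [List.foldl_cons,
          show (if c = '\n' ∨ c = '\r' then (t, v)
            else if c = ',' then (t + v, 0) else (t, pvStep v c)) = (t, pvStep v c) from by
              rw [if_neg (by tauto), if_neg hc],
          hf, ih t (pvStep v c)]
        simp [pvSum, hc]

-- ===== VERDICT (by name: the statement is the Claim_ definition above) =====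
theorem part1_spec : Claim_equal_part1 := by
  intro data _ hpre
  unfold Spec_part1 part1 part1_alt
  cases data with
  | nil => exact absurd rfl hpre
  | cons s0 rest =>
    have hget : PySem.List.pyGet? (s0 :: rest) 0 = some s0 := by
      simp [PySem.List.pyGet?, PySem.List.pyIdx?]
    rw [hget]
    simp only [replace_single, splitOn_comma]
    show (pvSplitC ((s0.toList.filter (· ≠ '\n')).filter (· ≠ '\r'))).foldl
        (fun sum p => sum + p.foldl pvStep 0) 0 = _
    rw [foldl_add_hash]
    have hscan := scan_eq s0.toList 0 0
    rw [show (fun (st : Int × Int) c =>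
        if c = '\n' ∨ c = '\r' then st
        else if c = ',' then (st.1 + st.2, 0)
        else (st.1, PySem.Int.mod ((st.2 + (c.toNat : Int)) * 17) 256)) =
      (fun (st : Int × Int) c =>
        if c = '\n' ∨ c = '\r' then st
        else if c = ',' then (st.1 + st.2, 0)
        else (st.1, pvStep st.2 c)) from rfl]
    rw [hscan]
    have := pvSum_splitC ((s0.toList.filter (· ≠ '\n')).filter (· ≠ '\r')) 0
    obtain ⟨p, ps, hp⟩ : ∃ p ps,
        pvSplitC ((s0.toList.filter (· ≠ '\n')).filter (· ≠ '\r')) = p :: ps := by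
      cases hq : pvSplitC ((s0.toList.filter (· ≠ '\n')).filter (· ≠ '\r')) with
      | nil => exact absurd hq (pvSplitC_ne_nil _)
      | cons p ps => exact ⟨p, ps, rfl⟩
    rw [hp] at this ⊢
    have this2 : pvSum 0 ((s0.toList.filter (· ≠ '\n')).filter (· ≠ '\r')) =
        List.foldl pvStep 0 p + (ps.map (·.foldl pvStep 0)).sum := this
    rw [this2]
    simp
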